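-- pv_equiv track=rewrite | github.com/morisan/aoc-2017-py | 13b.py | find_scanner_pos
-- ===== SOURCE A (Python) =====
-- def find_scanner_pos(r, ps):
--   pos = 0
--   direction = 'down'
--
--   cycle = r + (r - 2)
--   ps %= cycle
--
--   while ps > 0:
--     if direction == 'down':
--       pos += 1
--       ps  -= 1
--       if pos == r-1:
--         direction = 'up'
--     elif direction == 'up':
--       pos -= 1
--       ps  -= 1
--       if pos == 0:
--         direction = 'down'
--
--   return pos
-- ===== SOURCE B (Python) =====
-- def find_scanner_pos(r, ps):
--   period = 2 * r - 2
--   m = ps % period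
--   return min(m, period - m)
-- ===== Notes on version B (the rewrite author's own statement) =====
-- stated objective: faster
-- what changed: Replaces the step-by-step while-loop simulation of the scanner with the closed-form triangle wave min(ps % (2r-2), (2r-2) - ps % (2r-2)).
-- outside the precondition, e.g. on find_scanner_pos(0, 5): A returns 0, B returns -1; on find_scanner_pos(1, 3): A raises ZeroDivisionError, B raises ZeroDivisionError
import Mathlib
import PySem

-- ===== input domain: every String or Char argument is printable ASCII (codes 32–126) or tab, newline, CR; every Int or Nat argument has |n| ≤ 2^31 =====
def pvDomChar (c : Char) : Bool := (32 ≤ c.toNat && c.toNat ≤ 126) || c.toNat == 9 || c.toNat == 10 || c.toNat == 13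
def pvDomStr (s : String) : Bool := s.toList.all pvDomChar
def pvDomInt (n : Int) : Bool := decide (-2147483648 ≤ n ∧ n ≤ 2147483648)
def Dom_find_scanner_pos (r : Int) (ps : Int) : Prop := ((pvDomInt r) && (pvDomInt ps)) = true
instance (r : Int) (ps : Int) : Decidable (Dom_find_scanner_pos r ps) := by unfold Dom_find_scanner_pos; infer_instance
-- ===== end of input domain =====

-- B replaces A's step-by-step while-loop simulation by the closed-form triangle wave
-- min(ps % (2r-2), (2r-2) - ps % (2r-2)) (objective: faster, O(1) instead of O(r)).

-- ===== PORT A =====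
-- The while loop of A, transliterated: state (pos, direction, ps); terminates because
-- ps decreases by 1 in both executed branches (in the unreachable third branch — a
-- direction string other than 'down'/'up', which the initial call never produces —
-- Python would loop forever; the port returns pos there to be total).
def find_scanner_pos_go (r : Int) (pos : Int) (direction : String) (ps : Int) : Int :=
  if _h : ps > 0 then
    if direction = "down" then
      find_scanner_pos_go r (pos + 1)
        (if pos + 1 = r - 1 then "up" else direction) (ps - 1)
    else if direction = "up" then
      find_scanner_pos_go r (pos - 1)
        (if pos - 1 = 0 then "down" else direction) (ps - 1)
    else pos
  else pos
termination_by ps.toNat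
decreasing_by all_goals omega

def find_scanner_pos (r : Int) (ps : Int) : Int :=
  let cycle := r + (r - 2)
  let ps := PySem.Int.mod ps cycle
  find_scanner_pos_go r 0 "down" ps

-- ===== PORT B =====
def find_scanner_pos_alt (r : Int) (ps : Int) : Int :=
  let period := 2 * r - 2
  let m := PySem.Int.mod ps period
  min m (period - m)

-- ===== PRECONDITION & SPEC =====
-- Pre_ restricts to the natural domain of the puzzle, scanner ranges with at least two
-- positions: r = 1 makes A raise ZeroDivisionError (cycle = 0), and r ≤ 0 is outside the
-- natural domain of the function (a ping-pong range needs r ≥ 2).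
def Pre_find_scanner_pos (r : Int) (ps : Int) : Prop := 2 ≤ r
instance (r : Int) (ps : Int) : Decidable (Pre_find_scanner_pos r ps) := by unfold Pre_find_scanner_pos; infer_instance

def pvWitness_find_scanner_pos : Int × Int := (4, 11)

def Spec_find_scanner_pos (r : Int) (ps : Int) (out : Int) : Prop := out = find_scanner_pos_alt r ps
instance (r : Int) (ps : Int) (out : Int) : Decidable (Spec_find_scanner_pos r ps out) := by unfold Spec_find_scanner_pos; infer_instance

-- ===== CLAIM (what is proved, stated in full; the proofs are below) =====
def Claim_equal_find_scanner_pos : Prop := ∀ (r : Int) (ps : Int), Dom_find_scanner_pos r ps → Pre_find_scanner_pos r ps → Spec_find_scanner_pos r ps (find_scanner_pos r ps)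

-- ===== LEMMAS AND PROOFS =====

-- Upward-moving phase of the loop (direction = "up"): with ps ≤ pos remaining steps
-- the scanner never bounces at 0 with steps left, so it just walks down to pos - ps.
theorem go_up (r : Int) (ps : Int) (pos : Int)
    (h0 : 0 ≤ ps) (h1 : ps ≤ pos) :
    find_scanner_pos_go r pos "up" ps = pos - ps := by
  induction hn : ps.toNat generalizing ps pos with
  | zero =>
    have : ps = 0 := by omega
    subst this
    rw [find_scanner_pos_go, dif_neg (by omega)]
    omega
  | succ n ih =>
    have hps : ps > 0 := by omega
    rw [find_scanner_pos_go, dif_pos hps, if_neg (by decide), if_pos rfl]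
    by_cases hz : pos - 1 = 0
    · -- pos = 1, hence ps = 1: one step left, lands on 0
      have hp1 : pos = 1 := by omega
      have hq1 : ps = 1 := by omega
      subst hp1; subst hq1
      rw [if_pos hz]
      norm_num
      rw [find_scanner_pos_go, dif_neg (by omega)]
    · rw [if_neg hz, ih (ps - 1) (pos - 1) (by omega) (by omega) (by omega)]
      ring

-- Downward-moving phase (direction = "down"), started anywhere with 0 ≤ pos ≤ r-2 and
-- pos + ps ≤ 2(r-1): the result is the triangle wave of pos + ps.
theorem go_down (r : Int) (ps : Int) (pos : Int)
    (h0 : 0 ≤ ps) (h1 : 0 ≤ pos) (h2 : pos ≤ r - 2) (h3 : pos + ps ≤ 2 * (r - 1)) :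
    find_scanner_pos_go r pos "down" ps =
      if pos + ps ≤ r - 1 then pos + ps else 2 * (r - 1) - (pos + ps) := by
  induction hn : ps.toNat generalizing ps pos with
  | zero =>
    have : ps = 0 := by omega
    subst this
    rw [find_scanner_pos_go, dif_neg (by omega), if_pos (by omega)]
    omega
  | succ n ih =>
    have hps : ps > 0 := by omega
    rw [find_scanner_pos_go, dif_pos hps, if_pos rfl]
    by_cases ht : pos + 1 = r - 1
    · -- reached the top: switch to the upward phase
      rw [if_pos ht, go_up r (ps - 1) (pos + 1) (by omega) (by omega)]
      split_ifs with hb <;> omega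
    · rw [if_neg ht, ih (ps - 1) (pos + 1) (by omega) (by omega) (by omega) (by omega) (by omega)]
      split_ifs with hb hc hd <;> omega

theorem find_scanner_pos_eq_alt (r : Int) (ps : Int) (hr : 2 ≤ r) :
    find_scanner_pos r ps = find_scanner_pos_alt r ps := by
  unfold find_scanner_pos find_scanner_pos_alt
  have hcyc : r + (r - 2) = 2 * r - 2 := by ring
  rw [hcyc]
  have hpos : (0 : Int) < 2 * r - 2 := by omega
  have hm0 : 0 ≤ PySem.Int.mod ps (2 * r - 2) := PySem.Int.mod_nonneg ps hpos
  have hm1 : PySem.Int.mod ps (2 * r - 2) < 2 * r - 2 := PySem.Int.mod_lt ps hpos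
  set m := PySem.Int.mod ps (2 * r - 2) with hm
  rw [go_down r m 0 hm0 le_rfl (by omega) (by omega)]
  simp only [zero_add]
  rcases le_or_gt m (r - 1) with h | h
  · rw [if_pos h, min_eq_left (by omega)]
  · rw [if_neg (by omega), min_eq_right (by omega), ← hm]
    ring

-- ===== VERDICT (by name: the statement is the Claim_ definition above) =====
theorem find_scanner_pos_spec : Claim_equal_find_scanner_pos := by
  intro r ps _ hpre
  exact find_scanner_pos_eq_alt r ps hpre
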